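-- pv_equiv track=rewrite | github.com/YuGiOhAccess/YuGiOhAccess | src/game/client.py | flag_to_usable_cardspecs
-- ===== SOURCE A (Python) =====
-- def flag_to_usable_cardspecs(flag, reverse=False):
--     pm = flag & 0xff
--     ps = (flag >> 8) & 0xff
--     om = (flag >> 16) & 0xff
--     os = (flag >> 24) & 0xff
--     zone_names = ('pm', 'ps', 'om', 'os', 'q', 'pf', 'opf')
--     specs = []
--     for zn, val in zip(zone_names, (pm, ps, om, os)):
--         for i in range(8):
--             if reverse:
--                 avail = val & (1 << i) != 0
--             else:
--                 avail = val & (1 << i) == 0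
--             if avail:
--                 # if it's pm and it's i = 5 or i = 6, it's actually em 0 or 1
--                 if zn == 'pm' and i in (5, 6):
--                     specs.append('q' + str(i - 5))
--                     continue
--                 # if it's ps6, it's actually pf
--                 if zn == 'ps' and i == 6:
--                     specs.append('pf')
--                     continue
--                 # if it's os6, it's actually opf
--                 if zn == 'os' and i == 6:
--                     specs.append('opf')
--                     continue
--                 specs.append(zn + str(i))
--     return specs
-- ===== SOURCE B (Python) =====
-- # Flat table of the 32 spec names in bit order; one comprehension replaces the
-- # nested zone/bit loops and their special-case branches.
-- _SPEC_TABLE = (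
--     'pm0', 'pm1', 'pm2', 'pm3', 'pm4', 'q0', 'q1', 'pm7',
--     'ps0', 'ps1', 'ps2', 'ps3', 'ps4', 'ps5', 'pf', 'ps7',
--     'om0', 'om1', 'om2', 'om3', 'om4', 'om5', 'om6', 'om7',
--     'os0', 'os1', 'os2', 'os3', 'os4', 'os5', 'opf', 'os7',
-- )
--
--
-- def flag_to_usable_cardspecs(flag, reverse=False):
--     return [name for n, name in enumerate(_SPEC_TABLE)
--             if bool((flag >> n) & 1) == reverse]
-- ===== Notes on version B (the rewrite author's own statement) =====
-- stated objective: simpler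
-- what changed: Replaces the nested zone-by-bit loops and their four in-loop special-case branches with a single flat 32-entry name table (the q0/q1, pf and opf substitutions baked in at their bit positions) scanned once with a bit test per entry.
import Mathlib
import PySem

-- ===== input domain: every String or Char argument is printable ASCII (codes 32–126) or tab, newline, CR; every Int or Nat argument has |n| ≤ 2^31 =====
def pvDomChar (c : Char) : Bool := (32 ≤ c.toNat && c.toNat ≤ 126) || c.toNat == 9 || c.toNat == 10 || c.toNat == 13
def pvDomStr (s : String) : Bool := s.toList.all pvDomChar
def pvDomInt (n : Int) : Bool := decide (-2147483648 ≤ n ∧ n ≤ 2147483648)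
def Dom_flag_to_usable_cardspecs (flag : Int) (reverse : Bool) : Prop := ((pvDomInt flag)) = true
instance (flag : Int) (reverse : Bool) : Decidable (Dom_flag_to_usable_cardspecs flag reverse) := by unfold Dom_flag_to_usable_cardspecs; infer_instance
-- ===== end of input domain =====

-- B replaces A's nested zone×bit loops and their in-loop special cases by one flat
-- 32-entry name table scanned once (objective: simpler).

-- ===== PORT A =====
-- literal port of A; Python's '1 << i' with i from range(8) is nonnegative, so
-- '1 <<< i.toNat' is exact here.
def flag_to_usable_cardspecs (flag : Int) (reverse : Bool) : List String :=
  let pm := PySem.Int.band flag 255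
  let ps := PySem.Int.band (flag >>> (8 : Nat)) 255
  let om := PySem.Int.band (flag >>> (16 : Nat)) 255
  let os := PySem.Int.band (flag >>> (24 : Nat)) 255
  let zone_names : List String := ["pm", "ps", "om", "os", "q", "pf", "opf"]
  (List.zip zone_names [pm, ps, om, os]).foldl (fun specs p =>
    (PySem.List.pyRange 0 8 1).foldl (fun specs i =>
      let avail : Bool :=
        if reverse then decide (PySem.Int.band p.2 (1 <<< i.toNat) ≠ 0)
        else decide (PySem.Int.band p.2 (1 <<< i.toNat) = 0)
      if avail then
        if p.1 = "pm" ∧ (i = 5 ∨ i = 6) then specs ++ ["q" ++ PySem.Int.toStr (i - 5)]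
        else if p.1 = "ps" ∧ i = 6 then specs ++ ["pf"]
        else if p.1 = "os" ∧ i = 6 then specs ++ ["opf"]
        else specs ++ [p.1 ++ PySem.Int.toStr i]
      else specs) specs) []

-- ===== PORT B =====
def pvSpecTable : List String :=
  ["pm0", "pm1", "pm2", "pm3", "pm4", "q0", "q1", "pm7",
   "ps0", "ps1", "ps2", "ps3", "ps4", "ps5", "pf", "ps7",
   "om0", "om1", "om2", "om3", "om4", "om5", "om6", "om7",
   "os0", "os1", "os2", "os3", "os4", "os5", "opf", "os7"]

-- literal port of B; enumerate indices are 0..31, so 'flag >>> n.toNat' is exact.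
def flag_to_usable_cardspecs_alt (flag : Int) (reverse : Bool) : List String :=
  (PySem.List.enumerate pvSpecTable).foldl (fun acc p =>
    if (decide (PySem.Int.band (flag >>> p.1.toNat) 1 ≠ 0)) == reverse then acc ++ [p.2]
    else acc) []

-- ===== PRECONDITION & SPEC =====
def Spec_flag_to_usable_cardspecs (flag : Int) (reverse : Bool) (out : List String) : Prop := out = flag_to_usable_cardspecs_alt flag reverse
instance (flag : Int) (reverse : Bool) (out : List String) : Decidable (Spec_flag_to_usable_cardspecs flag reverse out) := by unfold Spec_flag_to_usable_cardspecs; infer_instance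

-- ===== CLAIM (what is proved, stated in full; the proofs are below) =====
def Claim_equal_flag_to_usable_cardspecs : Prop := ∀ (flag : Int) (reverse : Bool), Dom_flag_to_usable_cardspecs flag reverse → Spec_flag_to_usable_cardspecs flag reverse (flag_to_usable_cardspecs flag reverse)

-- ===== LEMMAS AND PROOFS =====

theorem pv_band_255 (x : Int) : PySem.Int.band x 255 = x % 256 := by
  have hmask : ∀ m : Nat, m &&& 255 = m % 256 := by
    intro m; have := Nat.and_two_pow_sub_one_eq_mod m 8; norm_num at this; exact this
  by_cases hx : 0 ≤ x
  · rw [PySem.Int.band_of_nonneg hx (by norm_num)]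
    have h255 : Int.toNat 255 = 255 := rfl
    rw [h255, hmask]
    omega
  · simp only [PySem.Int.band, if_neg hx, if_pos (by norm_num : (0:Int) ≤ 255)]
    have h255 : Int.toNat 255 = 255 := rfl
    rw [h255, Nat.land_comm, hmask]
    omega

theorem pv_bit_iff (x : Int) (i : Nat) (hi : i < 8) :
    (PySem.Int.band (PySem.Int.band x 255) (((1 <<< i : Nat) : Int)) = 0)
      ↔ (PySem.Int.band (x >>> i) 1 = 0) := by
  rw [pv_band_255, PySem.Int.band_one, PySem.Int.mod_eq_emod_of_pos (by norm_num),
      Int.shiftRight_eq_div_pow]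
  have hs : (((1 <<< i : Nat) : Int)) = (2:Int) ^ i := by
    rw [Nat.shiftLeft_eq]; push_cast; ring
  rw [hs, PySem.Int.band_of_nonneg (Int.emod_nonneg x (by norm_num)) (by positivity)]
  have h2 : ((2:Int) ^ i).toNat = 2 ^ i := by rw [← Nat.cast_ofNat, ← Nat.cast_pow, Int.toNat_natCast]
  rw [h2, Nat.and_two_pow, Nat.testBit_eq_decide_div_mod_eq]
  by_cases hb : (x % 256).toNat / 2 ^ i % 2 = 1
  · simp only [hb, decide_true, Bool.toNat_true, one_mul]
    interval_cases i <;> (norm_num) <;> omega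
  · simp only [hb, decide_false, Bool.toNat_false, zero_mul]
    interval_cases i <;> (norm_num at hb ⊢) <;> omega

lemma pv_filter_map_flatMap {α β : Type} (p : α → Bool) (f : α → β) (l : List α) :
    (l.filter p).map f = l.flatMap (fun x => if p x then [f x] else []) := by
  induction l with
  | nil => rfl
  | cons a as ih => simp only [List.filter_cons, List.flatMap_cons, ← ih]; split_ifs <;> simp

-- ===== VERDICT (by name: the statement is the Claim_ definition above) =====
theorem flag_to_usable_cardspecs_spec : Claim_equal_flag_to_usable_cardspecs := by
  intro flag reverse _
  show flag_to_usable_cardspecs flag reverse = flag_to_usable_cardspecs_alt flag reverse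
  have hB : flag_to_usable_cardspecs_alt flag reverse
      = (PySem.List.enumerate pvSpecTable).flatMap
          (fun p => if (decide (PySem.Int.band (flag >>> p.1.toNat) 1 ≠ 0)) == reverse
                    then [p.2] else []) := by
    unfold flag_to_usable_cardspecs_alt
    rw [PySem.List.foldl_append_if
          (fun p : Int × String => (decide (PySem.Int.band (flag >>> ((p.1.toNat : Int))) 1 ≠ 0)) == reverse)
          (fun p : Int × String => p.2), List.nil_append, pv_filter_map_flatMap]
  have hstep : ∀ p : String × Int,
      (fun (specs : List String) (i : Int) =>
        let avail : Bool :=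
          if reverse then decide (PySem.Int.band p.2 (1 <<< i.toNat) ≠ 0)
          else decide (PySem.Int.band p.2 (1 <<< i.toNat) = 0)
        if avail then
          if p.1 = "pm" ∧ (i = 5 ∨ i = 6) then specs ++ ["q" ++ PySem.Int.toStr (i - 5)]
          else if p.1 = "ps" ∧ i = 6 then specs ++ ["pf"]
          else if p.1 = "os" ∧ i = 6 then specs ++ ["opf"]
          else specs ++ [p.1 ++ PySem.Int.toStr i]
        else specs)
      = fun specs i =>
        if (if reverse then decide (PySem.Int.band p.2 (1 <<< i.toNat) ≠ 0)
            else decide (PySem.Int.band p.2 (1 <<< i.toNat) = 0)) then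
          specs ++ [if p.1 = "pm" ∧ (i = 5 ∨ i = 6) then "q" ++ PySem.Int.toStr (i - 5)
                    else if p.1 = "ps" ∧ i = 6 then "pf"
                    else if p.1 = "os" ∧ i = 6 then "opf"
                    else p.1 ++ PySem.Int.toStr i]
        else specs := by
    intro p; funext specs i; dsimp only; split_ifs <;> rfl
  have hout : (fun (specs : List String) (p : String × Int) =>
        (PySem.List.pyRange 0 8 1).foldl
          (fun (specs : List String) (i : Int) =>
            let avail : Bool :=
              if reverse then decide (PySem.Int.band p.2 (1 <<< i.toNat) ≠ 0)
              else decide (PySem.Int.band p.2 (1 <<< i.toNat) = 0)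
            if avail then
              if p.1 = "pm" ∧ (i = 5 ∨ i = 6) then specs ++ ["q" ++ PySem.Int.toStr (i - 5)]
              else if p.1 = "ps" ∧ i = 6 then specs ++ ["pf"]
              else if p.1 = "os" ∧ i = 6 then specs ++ ["opf"]
              else specs ++ [p.1 ++ PySem.Int.toStr i]
            else specs) specs)
      = fun specs p =>
        specs ++ (PySem.List.pyRange 0 8 1).flatMap (fun i =>
          if (if reverse then decide (PySem.Int.band p.2 (1 <<< i.toNat) ≠ 0)
              else decide (PySem.Int.band p.2 (1 <<< i.toNat) = 0)) then
            [if p.1 = "pm" ∧ (i = 5 ∨ i = 6) then "q" ++ PySem.Int.toStr (i - 5)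
             else if p.1 = "ps" ∧ i = 6 then "pf"
             else if p.1 = "os" ∧ i = 6 then "opf"
             else p.1 ++ PySem.Int.toStr i]
          else []) := by
    funext specs p
    rw [hstep p]
    rw [PySem.List.foldl_append_if
          (fun i : Int =>
            if reverse then decide (PySem.Int.band p.2 (1 <<< i.toNat) ≠ 0)
            else decide (PySem.Int.band p.2 (1 <<< i.toNat) = 0))
          (fun i : Int =>
            if p.1 = "pm" ∧ (i = 5 ∨ i = 6) then "q" ++ PySem.Int.toStr (i - 5)
            else if p.1 = "ps" ∧ i = 6 then "pf"
            else if p.1 = "os" ∧ i = 6 then "opf"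
            else p.1 ++ PySem.Int.toStr i), pv_filter_map_flatMap]
  have hA : flag_to_usable_cardspecs flag reverse
      = (List.zip ["pm", "ps", "om", "os", "q", "pf", "opf"]
          [PySem.Int.band flag 255, PySem.Int.band (flag >>> (8 : Nat)) 255,
           PySem.Int.band (flag >>> (16 : Nat)) 255,
           PySem.Int.band (flag >>> (24 : Nat)) 255]).flatMap
          (fun p => (PySem.List.pyRange 0 8 1).flatMap (fun i =>
            if (if reverse then decide (PySem.Int.band p.2 (1 <<< i.toNat) ≠ 0)
                else decide (PySem.Int.band p.2 (1 <<< i.toNat) = 0)) then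
              [if p.1 = "pm" ∧ (i = 5 ∨ i = 6) then "q" ++ PySem.Int.toStr (i - 5)
               else if p.1 = "ps" ∧ i = 6 then "pf"
               else if p.1 = "os" ∧ i = 6 then "opf"
               else p.1 ++ PySem.Int.toStr i]
            else [])) := by
    simp only [flag_to_usable_cardspecs]
    rw [hout, PySem.List.foldl_append_eq_flatMap, List.nil_append]
  have hr : PySem.List.pyRange 0 8 1 = [0, 1, 2, 3, 4, 5, 6, 7] := by decide
  have he : PySem.List.enumerate pvSpecTable = [(0, "pm0"), (1, "pm1"), (2, "pm2"), (3, "pm3"), (4, "pm4"), (5, "q0"), (6, "q1"), (7, "pm7"), (8, "ps0"), (9, "ps1"), (10, "ps2"), (11, "ps3"), (12, "ps4"), (13, "ps5"), (14, "pf"), (15, "ps7"), (16, "om0"), (17, "om1"), (18, "om2"), (19, "om3"), (20, "om4"), (21, "om5"), (22, "om6"), (23, "om7"), (24, "os0"), (25, "os1"), (26, "os2"), (27, "os3"), (28, "os4"), (29, "os5"), (30, "opf"), (31, "os7")] := by decide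
  have e0 : "q" ++ PySem.Int.toStr 0 = "q0" := rfl
  have e1 : "q" ++ PySem.Int.toStr 1 = "q1" := rfl
  have epm0 : "pm" ++ PySem.Int.toStr 0 = "pm0" := rfl
  have epm1 : "pm" ++ PySem.Int.toStr 1 = "pm1" := rfl
  have epm2 : "pm" ++ PySem.Int.toStr 2 = "pm2" := rfl
  have epm3 : "pm" ++ PySem.Int.toStr 3 = "pm3" := rfl
  have epm4 : "pm" ++ PySem.Int.toStr 4 = "pm4" := rfl
  have epm7 : "pm" ++ PySem.Int.toStr 7 = "pm7" := rfl
  have eps0 : "ps" ++ PySem.Int.toStr 0 = "ps0" := rfl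
  have eps1 : "ps" ++ PySem.Int.toStr 1 = "ps1" := rfl
  have eps2 : "ps" ++ PySem.Int.toStr 2 = "ps2" := rfl
  have eps3 : "ps" ++ PySem.Int.toStr 3 = "ps3" := rfl
  have eps4 : "ps" ++ PySem.Int.toStr 4 = "ps4" := rfl
  have eps5 : "ps" ++ PySem.Int.toStr 5 = "ps5" := rfl
  have eps7 : "ps" ++ PySem.Int.toStr 7 = "ps7" := rfl
  have eom0 : "om" ++ PySem.Int.toStr 0 = "om0" := rfl
  have eom1 : "om" ++ PySem.Int.toStr 1 = "om1" := rfl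
  have eom2 : "om" ++ PySem.Int.toStr 2 = "om2" := rfl
  have eom3 : "om" ++ PySem.Int.toStr 3 = "om3" := rfl
  have eom4 : "om" ++ PySem.Int.toStr 4 = "om4" := rfl
  have eom5 : "om" ++ PySem.Int.toStr 5 = "om5" := rfl
  have eom6 : "om" ++ PySem.Int.toStr 6 = "om6" := rfl
  have eom7 : "om" ++ PySem.Int.toStr 7 = "om7" := rfl
  have eos0 : "os" ++ PySem.Int.toStr 0 = "os0" := rfl
  have eos1 : "os" ++ PySem.Int.toStr 1 = "os1" := rfl
  have eos2 : "os" ++ PySem.Int.toStr 2 = "os2" := rfl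
  have eos3 : "os" ++ PySem.Int.toStr 3 = "os3" := rfl
  have eos4 : "os" ++ PySem.Int.toStr 4 = "os4" := rfl
  have eos5 : "os" ++ PySem.Int.toStr 5 = "os5" := rfl
  have eos7 : "os" ++ PySem.Int.toStr 7 = "os7" := rfl
  rw [hA, hB, hr, he]
  cases reverse <;>
    simp only [List.zip_cons_cons, List.zip_nil_right, List.flatMap_cons, List.flatMap_nil,
      List.append_nil, List.append_assoc, List.nil_append,
      Bool.false_eq_true, Bool.true_eq_false, reduceIte, if_true, if_false,
      Int.reduceToNat, Int.reduceSub, Int.reduceEq, String.reduceEq,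
      eq_self_iff_true, or_false, false_or, or_true, true_or,
      and_false, false_and, and_true, true_and,
      ne_eq, decide_not, Bool.not_not, beq_false, beq_true, decide_eq_true_eq,
      Int.shiftRight_natCast_right, ← Int.shiftRight_add, Nat.reduceAdd,
      pv_bit_iff _ 0 (by norm_num), pv_bit_iff _ 1 (by norm_num),
      pv_bit_iff _ 2 (by norm_num), pv_bit_iff _ 3 (by norm_num),
      pv_bit_iff _ 4 (by norm_num), pv_bit_iff _ 5 (by norm_num),
      pv_bit_iff _ 6 (by norm_num), pv_bit_iff _ 7 (by norm_num),
      e0, e1, epm0, epm1, epm2, epm3, epm4, epm7, eps0, eps1, eps2, eps3, eps4, eps5, eps7, eom0, eom1, eom2, eom3, eom4, eom5, eom6, eom7, eos0, eos1, eos2, eos3, eos4, eos5, eos7] <;> rfl
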